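-- pv_equiv track=rewrite | github.com/sesyacodez/scenic-ai | backend/app/main.py | _count_distinct_location_mentions
-- ===== SOURCE A (Python) =====
-- def _count_distinct_location_mentions(summary: str, location_names: list[str]) -> int:
--     normalized_summary = summary.lower()
--     count = 0
--     for name in location_names:
--         cleaned = name.strip().lower()
--         if not cleaned:
--             continue
--         if cleaned in normalized_summary:
--             count += 1
--     return count
-- ===== SOURCE B (Python) =====
-- def _count_distinct_location_mentions(summary: str, location_names: list[str]) -> int:
--     text = summary.lower()
--     freq = {}
--     for name in location_names:
--         cleaned = name.strip().lower()
--         if cleaned: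
--             freq[cleaned] = freq.get(cleaned, 0) + 1
--     return sum(n for pat, n in freq.items() if pat in text)
-- ===== Notes on version B (the rewrite author's own statement) =====
-- stated objective: alternative
-- what changed: B builds a frequency dict of the cleaned names first and runs the substring test once per DISTINCT cleaned name, summing multiplicities, instead of A's per-name substring scan.
import Mathlib
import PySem

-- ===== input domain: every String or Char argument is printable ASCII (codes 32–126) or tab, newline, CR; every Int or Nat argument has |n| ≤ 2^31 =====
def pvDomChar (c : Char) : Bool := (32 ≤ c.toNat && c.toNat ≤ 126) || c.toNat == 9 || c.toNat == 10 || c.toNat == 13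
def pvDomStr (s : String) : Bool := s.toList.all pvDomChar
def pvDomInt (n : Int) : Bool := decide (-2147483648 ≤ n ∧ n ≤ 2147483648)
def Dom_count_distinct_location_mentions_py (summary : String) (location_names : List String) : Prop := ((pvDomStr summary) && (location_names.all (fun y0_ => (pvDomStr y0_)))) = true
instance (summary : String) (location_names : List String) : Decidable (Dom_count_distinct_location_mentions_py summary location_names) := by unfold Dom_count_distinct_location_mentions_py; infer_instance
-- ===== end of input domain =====

-- B replaces A's per-name substring scan by a frequency dict over the cleaned names,
-- testing each DISTINCT cleaned name once and summing multiplicities (objective: alternative).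

-- ===== PORT A =====
def count_distinct_location_mentions_py (summary : String) (location_names : List String) : Int :=
  let normalized_summary := PySem.Str.lower summary
  location_names.foldl (fun count name =>
    let cleaned := PySem.Str.lower (PySem.Str.strip name)
    if cleaned = "" then count
    else if PySem.Str.isIn cleaned normalized_summary then count + 1 else count) 0

-- ===== PORT B =====
def count_distinct_location_mentions_py_alt (summary : String) (location_names : List String) : Int :=
  let text := PySem.Str.lower summary
  let freq : PySem.Dict String Int := location_names.foldl (fun d name =>
    let cleaned := PySem.Str.lower (PySem.Str.strip name)
    if cleaned = "" then d else d.insert cleaned (d.getD cleaned 0 + 1)) PySem.Dict.empty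
  ((freq.items.filter (fun p => PySem.Str.isIn p.1 text)).map (·.2)).sum

-- ===== PRECONDITION & SPEC =====
def Spec_count_distinct_location_mentions_py (summary : String) (location_names : List String) (out : Int) : Prop := out = count_distinct_location_mentions_py_alt summary location_names
instance (summary : String) (location_names : List String) (out : Int) : Decidable (Spec_count_distinct_location_mentions_py summary location_names out) := by unfold Spec_count_distinct_location_mentions_py; infer_instance

-- ===== CLAIM (what is proved, stated in full; the proofs are below) =====
def Claim_equal_count_distinct_location_mentions_py : Prop := ∀ (summary : String) (location_names : List String), Dom_count_distinct_location_mentions_py summary location_names → Spec_count_distinct_location_mentions_py summary location_names (count_distinct_location_mentions_py summary location_names)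

-- ===== LEMMAS AND PROOFS =====

-- the cleaned form of a name
def pvClean (name : String) : String := PySem.Str.lower (PySem.Str.strip name)

-- the nonempty cleaned names, in order
def pvCleaned (names : List String) : List String :=
  (names.map pvClean).filter (fun c => c ≠ "")

lemma pvCleaned_cons (n : String) (ns : List String) :
    pvCleaned (n :: ns) = if pvClean n = "" then pvCleaned ns else pvClean n :: pvCleaned ns := by
  by_cases h : pvClean n = "" <;> simp [pvCleaned, h]

-- A's loop counts the nonempty cleaned names that occur in the summary
lemma lemA (text : String) (names : List String) (acc : Int) :
    names.foldl (fun count name =>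
      if pvClean name = "" then count
      else if PySem.Str.isIn (pvClean name) text then count + 1 else count) acc
    = acc + ((pvCleaned names).countP (fun c => PySem.Str.isIn c text) : Int) := by
  induction names generalizing acc with
  | nil => simp [pvCleaned]
  | cons n ns ih =>
    rw [List.foldl_cons, pvCleaned_cons]
    by_cases h : pvClean n = ""
    · rw [if_pos h, if_pos h]
      exact ih acc
    · rw [if_neg h, if_neg h]
      simp only [List.countP_cons]
      by_cases h2 : PySem.Str.isIn (pvClean n) text = true
      · rw [if_pos h2, ih, if_pos h2]
        push_cast
        ring
      · rw [if_neg h2, ih, if_neg h2]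
        push_cast
        ring

-- B's dict loop runs over exactly the nonempty cleaned names
lemma lemB (names : List String) (d : PySem.Dict String Int) :
    names.foldl (fun d name =>
      if pvClean name = "" then d
      else d.insert (pvClean name) (d.getD (pvClean name) 0 + 1)) d
    = (pvCleaned names).foldl (fun d c => d.insert c (d.getD c 0 + 1)) d := by
  induction names generalizing d with
  | nil => simp [pvCleaned]
  | cons n ns ih =>
    rw [List.foldl_cons, pvCleaned_cons]
    by_cases h : pvClean n = ""
    · rw [if_pos h, if_pos h]
      exact ih d
    · rw [if_neg h, if_neg h, List.foldl_cons]
      exact ih _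

-- summing an indicator of equality with x over a nodup list containing x picks out x once
lemma sum_single {S : List String} {x : String} (c : Int)
    (hnd : S.Nodup) (hx : x ∈ S) :
    (S.map (fun k => if k = x then c else 0)).sum = c := by
  induction S with
  | nil => cases hx
  | cons a S ih =>
    by_cases hax : a = x
    · subst hax
      have hna : a ∉ S := (List.nodup_cons.mp hnd).1
      have hz : (S.map (fun k => if k = a then c else 0)).sum = 0 := by
        apply List.sum_eq_zero
        intro y hy
        obtain ⟨k, hk, rfl⟩ := List.mem_map.mp hy
        have hka : ¬ k = a := fun e => hna (e ▸ hk)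
        simp [hka]
      simp [hz]
    · have hxS : x ∈ S := by
        rcases List.mem_cons.mp hx with h | h
        · exact absurd h.symm hax
        · exact h
      simp [hax, ih (List.nodup_cons.mp hnd).2 hxS]

-- sum over a nodup superset of the ite-weighted multiplicities = countP
lemma sum_counts (p : String → Bool) (S L : List String)
    (hnd : S.Nodup) (hcov : ∀ x ∈ L, x ∈ S) :
    (S.map (fun k => if p k then (L.count k : Int) else 0)).sum
    = (L.countP p : Int) := by
  induction L with
  | nil => simp
  | cons x L ih =>
    have hx : x ∈ S := hcov x (by simp)
    have hcov' : ∀ y ∈ L, y ∈ S := fun y hy => hcov y (List.mem_cons_of_mem _ hy)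
    have split : (S.map (fun k => if p k then ((x :: L).count k : Int) else 0)).sum
        = (S.map (fun k => if p k then (L.count k : Int) else 0)).sum
          + (S.map (fun k => if k = x then (if p x then (1 : Int) else 0) else 0)).sum := by
      rw [← PySem.List.sum_map_add_int]
      apply congrArg List.sum
      apply List.map_congr_left
      intro k _
      by_cases hkx : k = x
      · subst hkx
        rw [List.count_cons_self]
        by_cases hp : p k <;> simp [hp]
      · have hxk : ¬ x = k := fun e => hkx e.symm
        have hcnt : (x :: L).count k = L.count k := by
          simp [hxk]
        rw [hcnt]
        by_cases hp : p k <;> simp [hp, hkx]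
    rw [split, ih hcov', sum_single _ hnd hx, List.countP_cons]
    push_cast
    by_cases hp : p x <;> simp [hp]

-- filter-then-project sum over the pairs equals the ite-weighted sum
lemma sum_filter_ite (p : String → Bool) (S : List String) (f : String → Int) :
    (((S.map (fun k => (k, f k))).filter (fun pr => p pr.1)).map (·.2)).sum
    = (S.map (fun k => if p k then f k else 0)).sum := by
  induction S with
  | nil => simp
  | cons a S ih =>
    by_cases hp : p a <;> simp [hp, ih]

-- ===== VERDICT (by name: the statement is the Claim_ definition above) =====
theorem count_distinct_location_mentions_py_spec : Claim_equal_count_distinct_location_mentions_py := by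
  intro summary names _
  show count_distinct_location_mentions_py summary names
      = count_distinct_location_mentions_py_alt summary names
  have e1 : count_distinct_location_mentions_py summary names
      = names.foldl (fun count name =>
          if pvClean name = "" then count
          else if PySem.Str.isIn (pvClean name) (PySem.Str.lower summary) then count + 1 else count) 0 := rfl
  have e2 : count_distinct_location_mentions_py_alt summary names
      = ((((names.foldl (fun d name =>
            if pvClean name = "" then d
            else d.insert (pvClean name) (d.getD (pvClean name) 0 + 1))
          PySem.Dict.empty).items).filter
            (fun pr => PySem.Str.isIn pr.1 (PySem.Str.lower summary))).map (·.2)).sum := rfl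
  rw [e1, e2, lemA, lemB, PySem.Dict.foldl_insert_getD_add_one_eq_counter, PySem.Dict.items_counter,
      sum_filter_ite (fun s => PySem.Str.isIn s (PySem.Str.lower summary))
        (PySem.Set.ofList (pvCleaned names)) (fun k => ((pvCleaned names).count k : Int)),
      sum_counts _ _ _ (PySem.Set.nodup_ofList _)
        (fun x hx => (PySem.Set.mem_ofList _ x).mpr hx)]
  simp
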